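-- pv_equiv track=rewrite | github.com/ihseo/programmers | programmers/lessons_42629/ramen_factory.py | solution
-- ===== SOURCE A (Python) =====
-- import heapq as hq
--
-- def solution(stock, dates, supplies, k):
--     count, idx = 0, 0
--     queue = []
--     while stock < k:
--         for i in range(idx, len(dates)):
--             if dates[i] <= stock:
--                 hq.heappush(queue, -supplies[i])
--                 idx = i + 1
--             else:
--                 break
--         stock += -hq.heappop(queue)
--         count += 1
--     return count
-- ===== SOURCE B (Python) =====
-- def solution(stock, dates, supplies, k):
--     count = 0
--     pairs = list(zip(dates, supplies))
--     pool = []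
--     while stock < k:
--         while pairs and pairs[0][0] <= stock:
--             pool.append(pairs.pop(0)[1])
--         mx = pool[0]            # IndexError on an empty pool, like heappop([])
--         for x in pool[1:]:
--             if x > mx:
--                 mx = x
--         pool.remove(mx)
--         stock += mx
--         count += 1
--     return count
-- ===== Notes on version B (the rewrite author's own statement) =====
-- stated objective: simpler
-- what changed: Replaces the heapq priority queue and monotone index pointer with a zipped (date, supply) list consumed from the front into a plain pool, selecting each refill by a linear max-scan and removing it with list.remove.
-- outside the precondition, e.g. on solution(0, [0, 99], [7], 5): A returns 1, B returns 1; on solution(0, [0, 5], [9], 9): A returns 1, B returns 1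
import Mathlib
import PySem

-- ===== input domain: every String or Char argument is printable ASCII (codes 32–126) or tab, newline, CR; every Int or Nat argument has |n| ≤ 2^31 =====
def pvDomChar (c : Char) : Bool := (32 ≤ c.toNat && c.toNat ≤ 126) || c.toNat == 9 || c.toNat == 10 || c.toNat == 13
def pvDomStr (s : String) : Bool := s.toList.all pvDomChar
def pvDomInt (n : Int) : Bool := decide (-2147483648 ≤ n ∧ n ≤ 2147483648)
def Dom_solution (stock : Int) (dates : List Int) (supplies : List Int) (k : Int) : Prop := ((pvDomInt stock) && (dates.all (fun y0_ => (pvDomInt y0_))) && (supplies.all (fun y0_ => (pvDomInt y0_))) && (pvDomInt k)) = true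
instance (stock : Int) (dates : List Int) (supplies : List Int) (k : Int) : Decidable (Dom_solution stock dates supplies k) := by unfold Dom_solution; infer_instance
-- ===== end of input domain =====

-- B replaces A's heapq priority queue and index pointer by a zipped (date, supply) list consumed
-- from the front into a plain pool, with a linear max-scan and list.remove per refill (simpler,
-- not faster); equivalence is about the return value.

-- ===== PORT A =====
-- heapq's min-heap is modelled by its observable behaviour: a list kept sorted ascending,
-- heappush = ordered insert, heappop = take the head (exact for the values popped).
-- Inner `for i in range(idx, len(dates))` with break: `none` = IndexError on supplies[i].
def admitA (dates supplies : List Int) (stock : Int) (idx : Nat) (q : List Int) :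
    Option (Nat × List Int) :=
  match h : dates[idx]? with
  | none => some (idx, q)
  | some d =>
    if d ≤ stock then
      match supplies[idx]? with
      | none => none
      | some s => admitA dates supplies stock (idx + 1) (List.orderedInsert (· ≤ ·) (-s) q)
    else some (idx, q)
termination_by dates.length - idx
decreasing_by
  have : idx < dates.length := (List.getElem?_eq_some_iff.mp h).1
  omega

-- the while loop; fuel dates.length + 1 never runs out (each iteration pops one of ≤ n pushes);
-- `none` = IndexError (heappop [] or supplies too short).
def loopA (dates supplies : List Int) (k : Int) : Nat → Int → Int → Nat → List Int → Option Int
  | 0, _, _, _, _ => none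
  | fuel + 1, stock, count, idx, q =>
    if stock < k then
      match admitA dates supplies stock idx q with
      | none => none
      | some (idx', q') =>
        match q' with
        | [] => none
        | m :: rest => loopA dates supplies k fuel (stock + -m) (count + 1) idx' rest
    else some count

def solution (stock : Int) (dates : List Int) (supplies : List Int) (k : Int) : Int :=
  (loopA dates supplies k (dates.length + 1) stock 0 0 []).getD 0

-- ===== PORT B =====
-- `while pairs and pairs[0][0] <= stock: pool.append(pairs.pop(0)[1])`
def feedB (stock : Int) : List (Int × Int) → List Int → List (Int × Int) × List Int
  | [], pool => ([], pool)
  | (d, s) :: rest, pool =>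
    if d ≤ stock then feedB stock rest (pool ++ [s]) else ((d, s) :: rest, pool)

-- `mx = pool[0]; for x in pool[1:]: if x > mx: mx = x`
def scanMax (mx : Int) (t : List Int) : Int :=
  t.foldl (fun m x => if x > m then x else m) mx

def loopB (k : Int) : Nat → Int → Int → List (Int × Int) → List Int → Option Int
  | 0, _, _, _, _ => none
  | fuel + 1, stock, count, pairs, pool =>
    if stock < k then
      match feedB stock pairs pool with
      | (pairs', pool') =>
        match pool' with
        | [] => none   -- pool[0] raises IndexError on the empty pool
        | h :: t =>
          let mx := scanMax h t
          loopB k fuel (stock + mx) (count + 1) pairs' ((h :: t).erase mx)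
    else some count

def solution_alt (stock : Int) (dates : List Int) (supplies : List Int) (k : Int) : Int :=
  (loopB k (dates.length + 1) stock 0 (dates.zip supplies) []).getD 0

-- ===== PRECONDITION & SPEC =====
-- Pre_ excludes exactly (a) the inputs where A raises IndexError — by the prefix-reachability
-- criterion below (nonnegative refills clipped at 0, since a negative refill never helps reach k),
-- the greedy runs out of reachable supplies before the stock reaches k — and (b) the malformed
-- shape len(dates) > len(supplies) (the two are parallel arrays of this problem), on which A
-- either raises IndexError or returns a value B also returns.
def posPrefix (supplies : List Int) (m : Nat) : Int :=
  ((supplies.take m).map (fun s => max s 0)).sum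

def Pre_solution (stock : Int) (dates : List Int) (supplies : List Int) (k : Int) : Prop :=
  k ≤ stock ∨ (dates.length ≤ supplies.length ∧
    ∃ j < dates.length + 1, k ≤ stock + posPrefix supplies j ∧
      ∀ m < j, dates.getD m 0 ≤ stock + posPrefix supplies m)
instance (stock : Int) (dates : List Int) (supplies : List Int) (k : Int) :
    Decidable (Pre_solution stock dates supplies k) := by unfold Pre_solution; infer_instance

def pvWitness_solution : Int × List Int × List Int × Int := (0, [0], [5], 3)

def Spec_solution (stock : Int) (dates : List Int) (supplies : List Int) (k : Int) (out : Int) : Prop := out = solution_alt stock dates supplies k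
instance (stock : Int) (dates : List Int) (supplies : List Int) (k : Int) (out : Int) : Decidable (Spec_solution stock dates supplies k out) := by unfold Spec_solution; infer_instance

-- ===== CLAIM (what is proved, stated in full; the proofs are below) =====
def Claim_equal_solution : Prop := ∀ (stock : Int) (dates : List Int) (supplies : List Int) (k : Int), Dom_solution stock dates supplies k → Pre_solution stock dates supplies k → Spec_solution stock dates supplies k (solution stock dates supplies k)

-- ===== LEMMAS AND PROOFS =====

theorem scanMax_mem (t : List Int) : ∀ mx : Int, scanMax mx t ∈ mx :: t := by
  induction t with
  | nil => intro mx; simp [scanMax]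
  | cons a t ih =>
    intro mx
    show scanMax (if a > mx then a else mx) t ∈ mx :: a :: t
    rcases List.mem_cons.mp (ih (if a > mx then a else mx)) with h | h
    · rw [h]; split <;> simp
    · simp [h]

theorem le_scanMax (t : List Int) : ∀ mx x : Int, x ∈ mx :: t → x ≤ scanMax mx t := by
  induction t with
  | nil => intro mx x hx; simp at hx; simp [scanMax, hx]
  | cons a t ih =>
    intro mx x hx
    show x ≤ scanMax (if a > mx then a else mx) t
    rcases List.mem_cons.mp hx with rfl | hx'
    case inl =>
      have : x ≤ (if a > x then a else x) := by split <;> omega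
      exact le_trans this (ih _ _ (by simp))
    rcases List.mem_cons.mp hx' with rfl | hx''
    · have : x ≤ (if x > mx then x else mx) := by split <;> omega
      exact le_trans this (ih _ _ (by simp))
    · exact ih _ _ (by simp [hx''])

-- the relation between A's heap state (sorted negated values, monotone index) and B's state
-- (remaining zipped pairs, unordered pool)
theorem feed_rel (dates supplies : List Int) (stock : Int)
    (hlen : dates.length ≤ supplies.length) :
    ∀ (n idx : Nat) (q pool : List Int), dates.length - idx ≤ n →
    List.Perm (q.map (fun x => -x)) pool → q.Sorted (· ≤ ·) →
    ∃ (idx' : Nat) (q' pool' : List Int),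
      admitA dates supplies stock idx q = some (idx', q') ∧
      feedB stock ((dates.zip supplies).drop idx) pool =
        ((dates.zip supplies).drop idx', pool') ∧
      List.Perm (q'.map (fun x => -x)) pool' ∧ q'.Sorted (· ≤ ·) := by
  intro n
  induction n with
  | zero =>
    intro idx q pool hn hp hs
    have hd : dates[idx]? = none := by rw [List.getElem?_eq_none_iff]; omega
    have hz : (dates.zip supplies).drop idx = [] := by
      rw [List.drop_eq_nil_iff]; simp; omega
    rw [admitA, hd]
    exact ⟨idx, q, pool, rfl, by rw [hz]; rfl, hp, hs⟩
  | succ n ih =>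
    intro idx q pool hn hp hs
    rw [admitA]
    match hd : dates[idx]? with
    | none =>
      have hge : dates.length ≤ idx := List.getElem?_eq_none_iff.mp hd
      have hz : (dates.zip supplies).drop idx = [] := by
        rw [List.drop_eq_nil_iff]; simp; omega
      exact ⟨idx, q, pool, rfl, by rw [hz]; rfl, hp, hs⟩
    | some d =>
      have hidx : idx < dates.length := (List.getElem?_eq_some_iff.mp hd).1
      have hidx2 : idx < supplies.length := lt_of_lt_of_le hidx hlen
      have hdval : dates[idx] = d := (List.getElem?_eq_some_iff.mp hd).2
      have hzlen : idx < (dates.zip supplies).length := by simp; omega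
      have hdrop : (dates.zip supplies).drop idx =
          (d, supplies[idx]) :: (dates.zip supplies).drop (idx + 1) := by
        rw [List.drop_eq_getElem_cons hzlen, List.getElem_zip, hdval]
      by_cases hds : d ≤ stock
      · simp only [hds, if_true]
        rw [List.getElem?_eq_getElem hidx2]
        have hperm' : List.Perm
            ((List.orderedInsert (· ≤ ·) (-supplies[idx]) q).map (fun x => -x))
            (pool ++ [supplies[idx]]) := by
          have h1 : List.Perm (List.orderedInsert (· ≤ ·) (-supplies[idx]) q)
              ((-supplies[idx]) :: q) := List.perm_orderedInsert _ _ _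
          have h2 := h1.map (fun x : Int => -x)
          have h3 : ((-supplies[idx]) :: q).map (fun x : Int => -x)
              = supplies[idx] :: q.map (fun x => -x) := by simp
          have h4 : List.Perm (supplies[idx] :: q.map (fun x => -x))
              (supplies[idx] :: pool) := hp.cons _
          have h5 : List.Perm (supplies[idx] :: pool) (pool ++ [supplies[idx]]) :=
            (List.perm_append_singleton _ pool).symm
          exact ((h2.trans (h3 ▸ List.Perm.refl _)).trans h4).trans h5
        have hsort' : (List.orderedInsert (· ≤ ·) (-supplies[idx]) q).Sorted (· ≤ ·) :=
          List.Sorted.orderedInsert _ _ hs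
        obtain ⟨idx', q', pool', hA, hB, hp', hs'⟩ :=
          ih (idx + 1) _ (pool ++ [supplies[idx]]) (by omega) hperm' hsort'
        refine ⟨idx', q', pool', hA, ?_, hp', hs'⟩
        rw [hdrop]
        show feedB stock ((d, supplies[idx]) :: (dates.zip supplies).drop (idx + 1)) pool = _
        rw [feedB]
        simp only [hds, if_true]
        exact hB
      · simp only [hds, if_false]
        refine ⟨idx, q, pool, rfl, ?_, hp, hs⟩
        rw [hdrop]
        show feedB stock ((d, supplies[idx]) :: (dates.zip supplies).drop (idx + 1)) pool = _
        rw [feedB]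
        simp only [hds, if_false]

-- popping: the scanned max of the pool is the negated head of the sorted heap,
-- and removing it keeps the two states related
theorem pop_rel (m : Int) (rest : List Int) (h : Int) (t : List Int)
    (hp : List.Perm ((m :: rest).map (fun x => -x)) (h :: t))
    (hs : (m :: rest).Sorted (· ≤ ·)) :
    scanMax h t = -m ∧
      List.Perm (rest.map (fun x => -x)) ((h :: t).erase (scanMax h t)) := by
  obtain ⟨hm, hrest⟩ := List.sorted_cons.mp hs
  have hmem : (-m) ∈ h :: t := hp.mem_iff.mp (by simp)
  have hub : ∀ x ∈ h :: t, x ≤ -m := by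
    intro x hx
    have hx' : x ∈ (m :: rest).map (fun y => -y) := hp.mem_iff.mpr hx
    simp only [List.mem_map, List.mem_cons] at hx'
    obtain ⟨y, hy, rfl⟩ := hx'
    rcases hy with rfl | hy
    · omega
    · have := hm y hy; omega
  have hle : -m ≤ scanMax h t := le_scanMax t h (-m) hmem
  have hge : scanMax h t ≤ -m := hub _ (scanMax_mem t h)
  have hmx : scanMax h t = -m := le_antisymm hge hle
  refine ⟨hmx, ?_⟩
  rw [hmx]
  have he : List.Perm ((h :: t).erase (-m)) (((m :: rest).map (fun x => -x)).erase (-m)) :=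
    (hp.symm).erase (-m)
  have heq : ((m :: rest).map (fun x => -x)).erase (-m) = rest.map (fun x => -x) := by
    simp [List.erase_cons_head]
  exact ((heq ▸ he).symm)

theorem loop_rel (dates supplies : List Int) (k : Int)
    (hlen : dates.length ≤ supplies.length) :
    ∀ (fuel : Nat) (stock count : Int) (idx : Nat) (q pool : List Int),
    List.Perm (q.map (fun x => -x)) pool → q.Sorted (· ≤ ·) →
    loopA dates supplies k fuel stock count idx q =
      loopB k fuel stock count ((dates.zip supplies).drop idx) pool := by
  intro fuel
  induction fuel with
  | zero => intro stock count idx q pool _ _; rfl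
  | succ n ih =>
    intro stock count idx q pool hp hs
    show (if stock < k then _ else some count) = (if stock < k then _ else some count)
    by_cases hk : stock < k
    · simp only [hk, if_true]
      obtain ⟨idx', q', pool', hA, hB, hp', hs'⟩ :=
        feed_rel dates supplies stock hlen (dates.length - idx) idx q pool le_rfl hp hs
      rw [hA, hB]
      match q', pool', hp', hs' with
      | [], pool', hp', _ =>
        have : pool' = [] := hp'.symm.eq_nil
        subst this; rfl
      | m :: rest, [], hp', _ =>
        exact absurd hp'.eq_nil (by simp)
      | m :: rest, h :: t, hp', hs' =>
        obtain ⟨hmx, herase⟩ := pop_rel m rest h t hp' hs'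
        show loopA dates supplies k n (stock + -m) (count + 1) idx' rest =
          loopB k n (stock + scanMax h t) (count + 1) ((dates.zip supplies).drop idx')
            ((h :: t).erase (scanMax h t))
        rw [hmx] at herase ⊢
        exact ih _ _ _ _ _ herase (List.sorted_cons.mp hs').2
    · simp only [hk, if_false]

-- ===== VERDICT (by name: the statement is the Claim_ definition above) =====
theorem solution_spec : Claim_equal_solution := by
  intro stock dates supplies k _ hpre
  show solution stock dates supplies k = solution_alt stock dates supplies k
  rcases hpre with hk | ⟨hlen, -⟩
  · have hnl : ¬ stock < k := not_lt.mpr hk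
    simp [solution, solution_alt, loopA, loopB, hnl]
  · unfold solution solution_alt
    rw [loop_rel dates supplies k hlen (dates.length + 1) stock 0 0 [] []
      (List.Perm.refl _) List.Pairwise.nil]
    rfl
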